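-- pv_equiv track=rewrite | github.com/S4LIN3/test_project | smart_research_data_assistant/src/modules/docs/pdf_processor.py | join_context
-- ===== SOURCE A (Python) =====
-- from typing import Iterable
--
-- def join_context(chunks: Iterable[str], max_chars: int = 4500) -> str:
--     collected = []
--     total = 0
--     for chunk in chunks:
--         chunk_len = len(chunk)
--         if total + chunk_len > max_chars:
--             break
--         collected.append(chunk)
--         total += chunk_len
--     return "\n\n".join(collected)
-- ===== SOURCE B (Python) =====
-- def join_context(chunks, max_chars=4500):
--     # Materialize and build an explicit prefix-sum table: prefix[k] = total
--     # length of the first k chunks. It is nondecreasing (lengths are >= 0),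
--     # so the cutoff index can be found by BINARY SEARCH instead of a linear
--     # scan: the answer is the largest k with prefix[k] <= max_chars.
--     chunks = list(chunks)
--     prefix = [0]
--     total = 0
--     for c in chunks:
--         total += len(c)
--         prefix.append(total)
--     lo, hi = 0, len(chunks)
--     while lo < hi:
--         mid = (lo + hi + 1) // 2
--         if prefix[mid] <= max_chars:
--             lo = mid
--         else:
--             hi = mid - 1
--     return "\n\n".join(chunks[:lo])
-- ===== Notes on version B (the rewrite author's own statement) =====
-- stated objective: alternative
-- what changed: Replaced the single running-total loop with a two-stage algorithm: build an explicit prefix-sum table of chunk lengths, binary-search it (it is nondecreasing) for the largest prefix fitting max_chars, then join that slice.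
import Mathlib
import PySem

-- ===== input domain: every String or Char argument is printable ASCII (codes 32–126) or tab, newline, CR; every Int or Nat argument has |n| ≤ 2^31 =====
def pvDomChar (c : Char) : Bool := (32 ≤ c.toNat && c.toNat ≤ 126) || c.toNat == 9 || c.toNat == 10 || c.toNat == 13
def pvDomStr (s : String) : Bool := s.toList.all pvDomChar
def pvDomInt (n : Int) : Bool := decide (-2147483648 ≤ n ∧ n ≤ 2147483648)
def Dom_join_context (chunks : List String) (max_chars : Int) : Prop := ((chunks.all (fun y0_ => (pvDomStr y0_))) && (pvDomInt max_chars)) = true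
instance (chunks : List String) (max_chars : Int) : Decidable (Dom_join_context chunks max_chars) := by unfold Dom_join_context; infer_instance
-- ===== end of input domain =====

-- B replaces A's running-total loop with a prefix-sum table plus binary search for the cutoff index (objective: alternative, same cost).


-- ===== PORT A =====
-- A: running-total loop, break when the next chunk would exceed the budget
def joinLoopA (chunks : List String) (collected : List String) (total : Int) (max_chars : Int) : List String :=
  match chunks with
  | [] => collected
  | chunk :: rest =>
    let chunk_len : Int := PySem.Str.len chunk
    if total + chunk_len > max_chars then collected
    else joinLoopA rest (collected ++ [chunk]) (total + chunk_len) max_chars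

def join_context (chunks : List String) (max_chars : Int) : String :=
  PySem.Str.join "\n\n" (joinLoopA chunks [] 0 max_chars)

-- ===== PORT B =====
-- B, stage 1: build the prefix-sum table (prefix = [0]; append total after each chunk)
def buildPrefix (chunks : List String) (pfx : List Int) (total : Int) : List Int :=
  match chunks with
  | [] => pfx
  | c :: rest =>
    let total' := total + PySem.Str.len c
    buildPrefix rest (pfx ++ [total']) total'

-- B, stage 2: binary search; prefix[mid] is always in range (lo < mid ≤ hi ≤ n),
-- so the .getD 0 default is never used
def bsearch (pfx : List Int) (max_chars : Int) (lo hi : Int) : Int :=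
  if h : lo < hi then
    -- Python binds mid = (lo + hi + 1) // 2 once; written inline here
    if (PySem.List.pyGet? pfx (PySem.Int.floordiv (lo + hi + 1) 2)).getD 0 ≤ max_chars then
      bsearch pfx max_chars (PySem.Int.floordiv (lo + hi + 1) 2) hi
    else
      bsearch pfx max_chars lo (PySem.Int.floordiv (lo + hi + 1) 2 - 1)
  else lo
  termination_by (hi - lo).toNat
  decreasing_by
  all_goals
    have hb := PySem.Int.floordiv_two_mid_bounds (lo := lo + 1) (hi := hi) (by omega)
    have he : PySem.Int.floordiv (lo + 1 + hi) 2 = PySem.Int.floordiv (lo + hi + 1) 2 := by ring_nf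
    omega

def join_context_alt (chunks : List String) (max_chars : Int) : String :=
  let pfx := buildPrefix chunks [0] 0
  let lo := bsearch pfx max_chars 0 (chunks.length : Int)
  PySem.Str.join "\n\n" (PySem.List.slice chunks none (some lo))

-- ===== PRECONDITION & SPEC =====
def Spec_join_context (chunks : List String) (max_chars : Int) (out : String) : Prop := out = join_context_alt chunks max_chars
instance (chunks : List String) (max_chars : Int) (out : String) : Decidable (Spec_join_context chunks max_chars out) := by unfold Spec_join_context; infer_instance

-- ===== CLAIM (what is proved, stated in full; the proofs are below) =====
def Claim_equal_join_context : Prop := ∀ (chunks : List String) (max_chars : Int), Dom_join_context chunks max_chars → Spec_join_context chunks max_chars (join_context chunks max_chars)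

-- ===== LEMMAS AND PROOFS =====

-- cumulative sums of the chunk lengths starting from t (proof-side view of both programs)
def accumLens (lens : List Int) (acc : Int) : List Int :=
  match lens with
  | [] => []
  | l :: rest => (acc + l) :: accumLens rest (acc + l)

lemma accumLens_length (lens : List Int) (acc : Int) : (accumLens lens acc).length = lens.length := by
  induction lens generalizing acc with
  | nil => simp [accumLens]
  | cons l rest ih => simp [accumLens, ih]

-- A's loop takes the longest prefix whose cumulative totals all stay ≤ max_chars
lemma joinLoopA_eq (chunks : List String) : ∀ (collected : List String) (total max_chars : Int),
    joinLoopA chunks collected total max_chars =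
      collected ++ chunks.take
        ((accumLens (chunks.map PySem.Str.len) total).takeWhile (fun t => t ≤ max_chars)).length := by
  induction chunks with
  | nil => intro collected total max_chars; simp [joinLoopA, accumLens]
  | cons c rest ih =>
    intro collected total max_chars
    simp only [joinLoopA, accumLens, List.map, List.takeWhile, PySem.Str.len_eq]
    split_ifs with h
    all_goals simp only [String.length_toList] at h
    · simp [show ¬ ((total + (c.length : Int)) ≤ max_chars) by omega]
    · rw [ih]
      simp [show (total + (c.length : Int)) ≤ max_chars by omega]

lemma buildPrefix_eq (chunks : List String) : ∀ (pfx : List Int) (total : Int),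
    buildPrefix chunks pfx total = pfx ++ accumLens (chunks.map PySem.Str.len) total := by
  induction chunks with
  | nil => intro pfx total; simp [buildPrefix, accumLens]
  | cons c rest ih =>
    intro pfx total
    simp [buildPrefix, accumLens, ih]

lemma accumLens_getD (lens : List Int) (acc : Int) (i : Nat) (hi : i < lens.length) :
    (accumLens lens acc).getD i 0 = acc + ((lens.take (i + 1)).sum) := by
  induction lens generalizing acc i with
  | nil => simp at hi
  | cons l rest ih =>
    cases i with
    | zero => simp [accumLens]
    | succ j =>
      simp only [accumLens, List.getD_cons_succ, List.take_succ_cons, List.sum_cons]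
      rw [ih _ j (by simpa using hi)]
      ring

lemma sum_take_mono (lens : List Int) (h : ∀ l ∈ lens, 0 ≤ l) :
    ∀ i j : Nat, i ≤ j → (lens.take i).sum ≤ (lens.take j).sum := by
  intro i j hij
  induction lens generalizing i j with
  | nil => simp
  | cons l rest ih =>
    cases i with
    | zero =>
      simp only [List.take_zero, List.sum_nil]
      have : ∀ m ∈ (l :: rest).take j, (0:Int) ≤ m := fun m hm => h m (List.mem_of_mem_take hm)
      exact List.sum_nonneg this
    | succ i' =>
      cases j with
      | zero => omega
      | succ j' =>
        simp only [List.take_succ_cons, List.sum_cons]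
        have := ih (fun l hl => h l (List.mem_cons_of_mem _ hl)) i' j' (by omega)
        omega

lemma accumLens_mono (lens : List Int) (acc : Int) (h : ∀ l ∈ lens, 0 ≤ l)
    (i j : Nat) (hij : i ≤ j) (hj : j < lens.length) :
    (accumLens lens acc).getD i 0 ≤ (accumLens lens acc).getD j 0 := by
  rw [accumLens_getD lens acc i (by omega), accumLens_getD lens acc j hj]
  have := sum_take_mono lens h (i+1) (j+1) (by omega)
  omega

-- takeWhile length is characterized by: all entries before t satisfy, entry t (if any) fails
lemma takeWhile_length_spec (xs : List Int) (p : Int → Bool) :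
    (∀ i : Nat, i < (xs.takeWhile p).length → p (xs.getD i 0) = true) ∧
    ((xs.takeWhile p).length < xs.length → p (xs.getD (xs.takeWhile p).length 0) = false) := by
  induction xs with
  | nil => simp
  | cons x rest ih =>
    by_cases hx : p x
    · constructor
      · intro i h
        cases i with
        | zero => simp [hx]
        | succ i' =>
          simp only [List.takeWhile, hx] at h ⊢
          simpa using ih.1 i' (by simpa using h)
      · intro h
        simp only [List.takeWhile, hx] at h ⊢
        simpa using ih.2 (by simpa using h)
    · constructor
      · intro i hlen
        simp [List.takeWhile, hx] at hlen
      · intro _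
        simp [List.takeWhile, hx]

-- bsearch invariant proof: with pfx = 0 :: acc (acc monotone), result r satisfies
-- (r = 0 ∨ pfx[r] ≤ max) ∧ (r = n ∨ pfx[r+1] > max), and 0 ≤ r ≤ n
lemma bsearch_spec (pfx : List Int) (max_chars : Int) :
    ∀ (lo hi : Int), 0 ≤ lo → lo ≤ hi → hi + 1 ≤ (pfx.length : Int) →
    (lo = 0 ∨ pfx.getD lo.toNat 0 ≤ max_chars) →
    (hi + 1 = (pfx.length : Int) ∨ max_chars < pfx.getD (hi.toNat + 1) 0) →
    lo ≤ bsearch pfx max_chars lo hi ∧ bsearch pfx max_chars lo hi ≤ hi ∧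
    (bsearch pfx max_chars lo hi = 0 ∨ pfx.getD (bsearch pfx max_chars lo hi).toNat 0 ≤ max_chars) ∧
    ((bsearch pfx max_chars lo hi) + 1 = (pfx.length : Int) ∨
      max_chars < pfx.getD ((bsearch pfx max_chars lo hi).toNat + 1) 0) := by
  intro lo hi
  induction hn : (hi - lo).toNat using Nat.strong_induction_on generalizing lo hi with
  | _ n ih =>
  intro h0 hlh hlen hlow hhigh
  rw [bsearch]
  split_ifs with h hcmp
  · -- lo < hi, pfx[mid] ≤ max_chars : recurse on [mid, hi]
    have hb := PySem.Int.floordiv_two_mid_bounds (lo := lo + 1) (hi := hi) (by omega)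
    have he : PySem.Int.floordiv (lo + 1 + hi) 2 = PySem.Int.floordiv (lo + hi + 1) 2 := by ring_nf
    set mid := PySem.Int.floordiv (lo + hi + 1) 2 with hmiddef
    rw [he] at hb
    have hget : (PySem.List.pyGet? pfx mid).getD 0 = pfx.getD mid.toNat 0 := by
      rw [show mid = ((mid.toNat : Nat) : Int) by omega, PySem.List.pyGet?_natCast,
        List.getD_eq_getElem?_getD]
      simp
      rw [show (max mid 0).toNat = mid.toNat from by omega]
    rw [hget] at hcmp
    have res := ih (hi - mid).toNat (by omega) mid hi rfl (by omega) (by omega) hlen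
      (Or.inr hcmp) hhigh
    exact ⟨by omega, res.2.1, res.2.2.1, res.2.2.2⟩
  · -- lo < hi, pfx[mid] > max_chars : recurse on [lo, mid-1]
    have hb := PySem.Int.floordiv_two_mid_bounds (lo := lo + 1) (hi := hi) (by omega)
    have he : PySem.Int.floordiv (lo + 1 + hi) 2 = PySem.Int.floordiv (lo + hi + 1) 2 := by ring_nf
    set mid := PySem.Int.floordiv (lo + hi + 1) 2 with hmiddef
    rw [he] at hb
    have hget : (PySem.List.pyGet? pfx mid).getD 0 = pfx.getD mid.toNat 0 := by
      rw [show mid = ((mid.toNat : Nat) : Int) by omega, PySem.List.pyGet?_natCast,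
        List.getD_eq_getElem?_getD]
      simp
      rw [show (max mid 0).toNat = mid.toNat from by omega]
    rw [hget] at hcmp
    have res := ih (mid - 1 - lo).toNat (by omega) lo (mid - 1) rfl h0 (by omega) (by omega)
      hlow (Or.inr (by rw [show (mid - 1).toNat + 1 = mid.toNat by omega]; omega))
    exact ⟨res.1, by omega, res.2.2.1, res.2.2.2⟩
  · -- lo = hi : done
    have : lo = hi := by omega
    subst this
    exact ⟨le_refl _, le_refl _, hlow, hhigh⟩

theorem join_context_spec : Claim_equal_join_context := by
  intro chunks max_chars _
  unfold Spec_join_context join_context join_context_alt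
  rw [joinLoopA_eq, List.nil_append, buildPrefix_eq]
  set lens := chunks.map PySem.Str.len with hlens
  have hnn : ∀ l ∈ lens, 0 ≤ l := by
    intro l hl
    rw [hlens] at hl
    obtain ⟨s, _, rfl⟩ := List.mem_map.mp hl
    simp [PySem.Str.len_eq]
  set acc := accumLens lens 0 with hacc
  have hacclen : acc.length = chunks.length := by
    rw [hacc, accumLens_length, hlens, List.length_map]
  set n := chunks.length with hn
  -- pfx = [0] ++ acc ; pfx.getD (k+1) = acc.getD k ; pfx.getD 0 = 0
  have hpgetz : (([0] ++ acc : List Int)).getD 0 0 = 0 := rfl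
  have hpget : ∀ k : Nat, (([0] ++ acc : List Int)).getD (k + 1) 0 = acc.getD k 0 := by
    intro k; rfl
  have hplen : (([0] ++ acc : List Int)).length = n + 1 := by simp [hacclen]
  have hbs := bsearch_spec ([0] ++ acc) max_chars 0 (n : Int) (le_refl 0) (by omega)
    (by rw [hplen]; push_cast; omega) (Or.inl rfl) (Or.inl (by rw [hplen]; push_cast; omega))
  set r := bsearch ([0] ++ acc) max_chars 0 (n : Int) with hr
  obtain ⟨hr0, hrn, hrlow, hrhigh⟩ := hbs
  set t := (acc.takeWhile (fun t => t ≤ max_chars)).length with ht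
  have htw := takeWhile_length_spec acc (fun t => t ≤ max_chars)
  have htlen : t ≤ n := by
    rw [ht]
    have := (List.takeWhile_prefix (p := fun t : Int => t ≤ max_chars) (l := acc)).length_le
    omega
  -- show r.toNat = t
  have hkey : r.toNat = t := by
    by_contra hne
    rcases Nat.lt_or_ge r.toNat t with hlt | hge
    · -- r.toNat < t: acc[r.toNat] ≤ max, but pfx[r+1] > max i.e. acc[r.toNat] > max
      have h1 : (acc.getD r.toNat 0) ≤ max_chars := by
        have := htw.1 r.toNat (by omega)
        simpa using this
      rcases hrhigh with hc | hc
      · rw [hplen] at hc; omega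
      · rw [hpget r.toNat] at hc; omega
    · -- t < r.toNat: acc[t] > max but acc[t] ≤ acc[r.toNat-1] ≤ max
      have hlt2 : t < r.toNat := by omega
      have htn : t < n := by omega
      have h2 : ¬ ((acc.getD t 0) ≤ max_chars) := by
        have := htw.2 (by omega)
        simpa using this
      rcases hrlow with hc | hc
      · omega
      · -- pfx[r] ≤ max; r ≥ 1 so pfx[r] = acc[r.toNat - 1]
        have hr1 : 1 ≤ r.toNat := by omega
        rw [show r.toNat = (r.toNat - 1) + 1 by omega, hpget] at hc
        have hll : lens.length = n := by rw [hlens, hn, List.length_map]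
        have hmono := accumLens_mono lens 0 hnn t (r.toNat - 1) (by omega) (by omega)
        rw [← hacc] at hmono
        omega
  -- conclude: both sides are joins of the same take
  have hslice : PySem.List.slice chunks none (some r) = chunks.take r.toNat :=
    PySem.List.slice_to _ (by omega)
  show PySem.Str.join "\n\n" (chunks.take t) =
    PySem.Str.join "\n\n" (PySem.List.slice chunks none (some r))
  rw [hslice, hkey]
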